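-- pv_equiv track=rewrite | github.com/junchu1987-ui/YT-BILI | video_processor.py | _sub_filter
-- ===== SOURCE A (Python) =====
-- def _sub_filter(srt_path, margin_v, font_size, colour):
--     """Build a subtitles= filter string with force_style for a given SRT file."""
--     # ffmpeg subtitles filter: backslash→forward slash, then escape filter-graph specials
--     safe_path = srt_path.replace('\\', '/')
--     # Escape characters special to ffmpeg's filter graph / subtitles filter
--     for ch in (':', '(', ')', '[', ']', ',', ';', "'"):
--         safe_path = safe_path.replace(ch, '\\' + ch)
--     style = (f"PlayResX=1920,PlayResY=1080,Alignment=2,MarginV={margin_v},"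
--              f"Fontname=SimSun,FontSize={font_size},PrimaryColour={colour},"
--              f"OutlineColour=&H00000000&,BorderStyle=1,Outline=3,Shadow=1,"
--              f"WrapStyle=1")
--     return f"subtitles='{safe_path}':force_style='{style}'"
-- ===== SOURCE B (Python) =====
-- def _sub_filter(srt_path, margin_v, font_size, colour):
--     """Build a subtitles= filter string with force_style for a given SRT file."""
--     # Single left-to-right scan: each character is classified once and the result
--     # is accumulated, instead of A's nine staged whole-string replace passes.
--     # Correct because '\\'->'/' produces '/', which is not a filter-graph special,
--     # so converting and escaping can be fused into one per-character decision.
--     out = []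
--     for c in srt_path:
--         if c == '\\':
--             out.append('/')
--         elif c in ":()[],;'":
--             out.append('\\')
--             out.append(c)
--         else:
--             out.append(c)
--     safe_path = ''.join(out)
--     style = (f"PlayResX=1920,PlayResY=1080,Alignment=2,MarginV={margin_v},"
--              f"Fontname=SimSun,FontSize={font_size},PrimaryColour={colour},"
--              f"OutlineColour=&H00000000&,BorderStyle=1,Outline=3,Shadow=1,"
--              f"WrapStyle=1")
--     return f"subtitles='{safe_path}':force_style='{style}'"
-- ===== Notes on version B (the rewrite author's own statement) =====
-- stated objective: alternative
-- what changed: Replaces A's nine staged whole-string .replace passes by a single left-to-right scan that classifies each character once (slash conversion and escaping fused into one per-character decision) into an output accumulator.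
import Mathlib
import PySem

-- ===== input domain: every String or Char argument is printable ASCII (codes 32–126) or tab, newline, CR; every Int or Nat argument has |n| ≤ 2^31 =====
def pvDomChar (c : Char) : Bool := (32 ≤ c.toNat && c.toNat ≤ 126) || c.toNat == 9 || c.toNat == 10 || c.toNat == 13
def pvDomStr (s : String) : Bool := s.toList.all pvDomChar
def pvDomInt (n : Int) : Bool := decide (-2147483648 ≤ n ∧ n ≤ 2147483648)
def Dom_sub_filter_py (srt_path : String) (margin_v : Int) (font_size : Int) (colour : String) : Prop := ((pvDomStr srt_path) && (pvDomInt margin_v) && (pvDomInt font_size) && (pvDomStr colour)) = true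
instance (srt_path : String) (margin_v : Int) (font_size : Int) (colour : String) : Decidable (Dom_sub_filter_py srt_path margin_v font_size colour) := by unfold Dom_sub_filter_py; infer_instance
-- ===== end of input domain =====

-- B replaces A's nine staged whole-string replace passes by one left-to-right scan classifying each character into an accumulator (same cost class; alternative decomposition).


-- ===== PORT A =====
def sub_filter_py (srt_path : String) (margin_v : Int) (font_size : Int) (colour : String) : String :=
  let safe_path := PySem.Str.replace srt_path "\\" "/"
  let safe_path := [":", "(", ")", "[", "]", ",", ";", "'"].foldl
    (fun sp ch => PySem.Str.replace sp ch ("\\" ++ ch)) safe_path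
  let style := "PlayResX=1920,PlayResY=1080,Alignment=2,MarginV=" ++ PySem.Int.toStr margin_v ++
    ",Fontname=SimSun,FontSize=" ++ PySem.Int.toStr font_size ++ ",PrimaryColour=" ++ colour ++
    ",OutlineColour=&H00000000&,BorderStyle=1,Outline=3,Shadow=1,WrapStyle=1"
  "subtitles='" ++ safe_path ++ "':force_style='" ++ style ++ "'"

-- ===== PORT B =====
-- Source B's single scan: each character classified once, results appended to an accumulator
def sub_filter_py_alt (srt_path : String) (margin_v : Int) (font_size : Int) (colour : String) : String :=
  let out := srt_path.toList.foldl (fun acc c =>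
    if c = '\\' then acc ++ ['/']
    else if c ∈ ":()[],;'".toList then acc ++ ['\\', c]
    else acc ++ [c]) []
  let safe_path := String.ofList out
  let style := "PlayResX=1920,PlayResY=1080,Alignment=2,MarginV=" ++ PySem.Int.toStr margin_v ++
    ",Fontname=SimSun,FontSize=" ++ PySem.Int.toStr font_size ++ ",PrimaryColour=" ++ colour ++
    ",OutlineColour=&H00000000&,BorderStyle=1,Outline=3,Shadow=1,WrapStyle=1"
  "subtitles='" ++ safe_path ++ "':force_style='" ++ style ++ "'"

-- ===== PRECONDITION & SPEC =====
def Spec_sub_filter_py (srt_path : String) (margin_v : Int) (font_size : Int) (colour : String) (out : String) : Prop := out = sub_filter_py_alt srt_path margin_v font_size colour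
instance (srt_path : String) (margin_v : Int) (font_size : Int) (colour : String) (out : String) : Decidable (Spec_sub_filter_py srt_path margin_v font_size colour out) := by unfold Spec_sub_filter_py; infer_instance

-- ===== CLAIM (what is proved, stated in full; the proofs are below) =====
def Claim_equal_sub_filter_py : Prop := ∀ (srt_path : String) (margin_v : Int) (font_size : Int) (colour : String), Dom_sub_filter_py srt_path margin_v font_size colour → Spec_sub_filter_py srt_path margin_v font_size colour (sub_filter_py srt_path margin_v font_size colour)

-- ===== LEMMAS AND PROOFS =====
-- per-character value of B's scan step
def pvEsc (c : Char) : List Char :=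
  if c = '\\' then ['/']
  else if c ∈ ":()[],;'".toList then ['\\', c]
  else [c]

lemma foldl_esc (l : List Char) (acc : List Char) :
    l.foldl (fun acc c =>
      if c = '\\' then acc ++ ['/']
      else if c ∈ ":()[],;'".toList then acc ++ ['\\', c]
      else acc ++ [c]) acc = acc ++ l.flatMap pvEsc := by
  induction l generalizing acc with
  | nil => simp
  | cons x t ih =>
    simp only [List.foldl_cons, List.flatMap_cons, ih, pvEsc]
    split_ifs <;> simp

lemma replace_go_one (c : Char) (new : List Char) :
    ∀ (l : List Char) (fuel : Nat) (acc : List Char), l.length ≤ fuel →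
    PySem.Chars.replace.go [c] new fuel l acc
      = acc.reverse ++ l.flatMap (fun x => if x = c then new else [x]) := by
  intro l
  induction l with
  | nil => intro fuel acc _; cases fuel <;> simp [PySem.Chars.replace.go]
  | cons x t ih =>
    intro fuel acc hle
    cases fuel with
    | zero => simp at hle
    | succ n =>
      rw [PySem.Chars.replace.go]
      simp only [List.length_cons, Nat.add_le_add_iff_right] at hle
      by_cases hx : x = c
      · subst hx
        rw [if_pos (by simp [List.isPrefixOf])]
        rw [show List.drop [x].length (x :: t) = t from rfl]
        rw [ih n _ hle]
        simp
      · rw [if_neg (by simp [List.isPrefixOf]; exact fun h => (hx h.symm).elim)]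
        rw [ih n _ hle]
        simp [hx]

lemma replace_one (cs : List Char) (c : Char) (new : List Char) :
    PySem.Chars.replace cs [c] new = cs.flatMap (fun x => if x = c then new else [x]) := by
  rw [PySem.Chars.replace]
  simp only [List.isEmpty_cons, Bool.false_eq_true, if_false]
  simpa using replace_go_one c new cs cs.length [] le_rfl

lemma safe_path_eq (s : String) :
    (([":", "(", ")", "[", "]", ",", ";", "'"].foldl
        (fun sp ch => PySem.Str.replace sp ch ("\\" ++ ch))
        (PySem.Str.replace s "\\" "/")).toList)
      = s.toList.flatMap pvEsc := by
  simp only [List.foldl, PySem.Str.toList_replace]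
  rw [show ("\\" : String).toList = ['\\'] from rfl, show ("/" : String).toList = ['/'] from rfl,
      show ("\\" ++ ":" : String).toList = ['\\', ':'] from rfl, show (":" : String).toList = [':'] from rfl,
      show ("\\" ++ "(" : String).toList = ['\\', '('] from rfl, show ("(" : String).toList = ['('] from rfl,
      show ("\\" ++ ")" : String).toList = ['\\', ')'] from rfl, show (")" : String).toList = [')'] from rfl,
      show ("\\" ++ "[" : String).toList = ['\\', '['] from rfl, show ("[" : String).toList = ['['] from rfl,
      show ("\\" ++ "]" : String).toList = ['\\', ']'] from rfl, show ("]" : String).toList = [']'] from rfl,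
      show ("\\" ++ "," : String).toList = ['\\', ','] from rfl, show ("," : String).toList = [','] from rfl,
      show ("\\" ++ ";" : String).toList = ['\\', ';'] from rfl, show (";" : String).toList = [';'] from rfl,
      show ("\\" ++ "'" : String).toList = ['\\', '\''] from rfl, show ("'" : String).toList = ['\''] from rfl]
  simp only [replace_one, List.flatMap_assoc]
  refine congrFun (congrArg List.flatMap (funext fun x => ?_)) s.toList
  by_cases h1 : x = '\\'; · subst h1; decide
  by_cases h2 : x = ':'; · subst h2; decide
  by_cases h3 : x = '('; · subst h3; decide
  by_cases h4 : x = ')'; · subst h4; decide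
  by_cases h5 : x = '['; · subst h5; decide
  by_cases h6 : x = ']'; · subst h6; decide
  by_cases h7 : x = ','; · subst h7; decide
  by_cases h8 : x = ';'; · subst h8; decide
  by_cases h9 : x = '\''; · subst h9; decide
  have hmem : x ∉ ":()[],;'".toList := by
    rw [show (":()[],;'" : String).toList = [':', '(', ')', '[', ']', ',', ';', '\''] from rfl]
    simp [h2, h3, h4, h5, h6, h7, h8, h9]
  simp [h1, h2, h3, h4, h5, h6, h7, h8, h9, pvEsc, hmem]

-- ===== VERDICT (by name: the statement is the Claim_ definition above) =====
theorem sub_filter_py_spec : Claim_equal_sub_filter_py := by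
  intro srt_path margin_v font_size colour _
  simp only [Spec_sub_filter_py, sub_filter_py, sub_filter_py_alt, foldl_esc, List.nil_append]
  rw [← safe_path_eq srt_path, String.ofList_toList]
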